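-- pv_equiv track=rewrite | github.com/milandas63/Trident-MCA-PY2-02-09-2024 | Day-16 (28-09-2024)/module_str.py | padCenter
-- ===== SOURCE A (Python) =====
-- def padCenter(s,l):
--     r = str(s)
--     for i in range(len(r),l):
--         if(i%2==0):
--             r = " "+r
--         else:
--             r = r+" "
--     return r
-- ===== SOURCE B (Python) =====
-- def padCenter(s, l):
--     r = str(s)
--     n = len(r)
--     pad = max(0, l - n)
--     left = (pad + 1) // 2 if n % 2 == 0 else pad // 2
--     return " " * left + r + " " * (pad - left)
-- ===== Notes on version B (the rewrite author's own statement) =====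
-- stated objective: simpler
-- what changed: Replaces the character-by-character alternating padding loop with a closed-form computation of the left/right pad widths (parity arithmetic) and two string repetitions.
import Mathlib
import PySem

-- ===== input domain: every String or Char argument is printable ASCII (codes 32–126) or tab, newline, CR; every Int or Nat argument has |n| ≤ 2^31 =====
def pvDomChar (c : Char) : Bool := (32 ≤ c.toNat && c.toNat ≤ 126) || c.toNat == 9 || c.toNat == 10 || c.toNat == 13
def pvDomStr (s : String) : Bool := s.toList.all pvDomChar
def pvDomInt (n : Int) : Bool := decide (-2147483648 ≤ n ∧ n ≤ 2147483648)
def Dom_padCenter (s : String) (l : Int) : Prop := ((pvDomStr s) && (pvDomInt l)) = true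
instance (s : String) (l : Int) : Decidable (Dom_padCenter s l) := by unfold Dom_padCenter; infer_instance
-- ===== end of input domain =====

-- B replaces A's alternating prepend/append loop by a closed-form computation of the
-- left and right pad widths (parity arithmetic) and two string repetitions (objective: simpler).

-- ===== PORT A =====
-- literal port of A: fold over range(len(r), l), prepending a space at even i, appending at odd i
def padCenter (s : String) (l : Int) : String :=
  String.mk ((PySem.List.pyRange (s.toList.length : Int) l 1).foldl
    (fun r i => if PySem.Int.mod i 2 = 0 then ' ' :: r else r ++ [' ']) s.toList)

-- ===== PORT B =====
def padCenter_alt (s : String) (l : Int) : String :=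
  let n : Int := s.toList.length
  let pad : Int := max 0 (l - n)
  let left : Int := if PySem.Int.mod n 2 = 0 then PySem.Int.floordiv (pad + 1) 2
                    else PySem.Int.floordiv pad 2
  String.mk (List.replicate left.toNat ' ' ++ s.toList ++ List.replicate (pad - left).toNat ' ')

-- ===== PRECONDITION & SPEC =====
def Spec_padCenter (s : String) (l : Int) (out : String) : Prop := out = padCenter_alt s l
instance (s : String) (l : Int) (out : String) : Decidable (Spec_padCenter s l out) := by
  unfold Spec_padCenter; infer_instance

-- ===== CLAIM (what is proved, stated in full; the proofs are below) =====
def Claim_equal_padCenter : Prop := ∀ (s : String) (l : Int), Dom_padCenter s l → Spec_padCenter s l (padCenter s l)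

-- ===== LEMMAS AND PROOFS =====

-- number of even indices in range(a, a+k)
def pvEvens (a : Int) (k : Nat) : Nat := if PySem.Int.mod a 2 = 0 then (k + 1) / 2 else k / 2

lemma pvMod2 (a : Int) : PySem.Int.mod a 2 = a % 2 :=
  PySem.Int.mod_eq_emod_of_pos (by norm_num)

lemma pvEvens_succ_even (a : Int) (k : Nat) (h : PySem.Int.mod a 2 = 0) :
    pvEvens a (k + 1) = pvEvens (a + 1) k + 1 := by
  have h' : ¬ PySem.Int.mod (a + 1) 2 = 0 := by
    rw [pvMod2] at h ⊢; omega
  simp only [pvEvens, h, h', if_true, if_false]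
  omega

lemma pvEvens_succ_odd (a : Int) (k : Nat) (h : ¬ PySem.Int.mod a 2 = 0) :
    pvEvens a (k + 1) = pvEvens (a + 1) k := by
  have h' : PySem.Int.mod (a + 1) 2 = 0 := by
    rw [pvMod2] at h ⊢; omega
  simp only [pvEvens, h, h', if_true, if_false]

lemma pvEvens_le (a : Int) (k : Nat) : pvEvens a k ≤ k := by
  unfold pvEvens; split <;> omega

-- the loop invariant: A's fold inserts pvEvens spaces on the left and the rest on the right
lemma pvLoop (k : Nat) : ∀ (a : Int) (r : List Char),
    (PySem.List.pyRange a (a + k) 1).foldl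
      (fun r i => if PySem.Int.mod i 2 = 0 then ' ' :: r else r ++ [' ']) r
    = List.replicate (pvEvens a k) ' ' ++ r ++ List.replicate (k - pvEvens a k) ' ' := by
  induction k with
  | zero =>
    intro a r
    simp [PySem.List.pyRange_one_eq_nil (le_refl a), pvEvens]
  | succ k ih =>
    intro a r
    rw [PySem.List.pyRange_one_cons (by omega : a < a + (k + 1 : Nat))]
    have harg : a + 1 + (k : Int) = a + ((k + 1 : Nat) : Int) := by push_cast; ring
    simp only [List.foldl_cons]
    by_cases h : PySem.Int.mod a 2 = 0
    · rw [if_pos h]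
      have := ih (a + 1) (' ' :: r)
      rw [harg] at this
      rw [this, pvEvens_succ_even a k h]
      have hsub : k + 1 - (pvEvens (a + 1) k + 1) = k - pvEvens (a + 1) k := by omega
      rw [hsub, List.replicate_succ']
      simp
    · rw [if_neg h]
      have := ih (a + 1) (r ++ [' '])
      rw [harg] at this
      rw [this, pvEvens_succ_odd a k h]
      have hle := pvEvens_le (a + 1) k
      have hsub : k + 1 - pvEvens (a + 1) k = (k - pvEvens (a + 1) k) + 1 := by omega
      rw [hsub, List.replicate_succ]
      simp

-- ===== VERDICT (by name: the statement is the Claim_ definition above) =====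
theorem padCenter_spec : Claim_equal_padCenter := by
  intro s l _
  simp only [Spec_padCenter, padCenter, padCenter_alt]
  set n : Int := (s.toList.length : Int) with hn
  have hn0 : 0 ≤ n := by positivity
  by_cases hl : l ≤ n
  · -- no padding
    rw [PySem.List.pyRange_one_eq_nil hl]
    have hpad : max 0 (l - n) = 0 := by omega
    simp only [hpad]
    have h0 : ∀ x : Int, (if PySem.Int.mod n 2 = 0 then PySem.Int.floordiv (0 + 1) 2
        else PySem.Int.floordiv 0 2) = x → x.toNat = 0 ∧ (0 - x).toNat = 0 := by
      intro x hx
      rw [PySem.Int.floordiv_eq_ediv_of_pos (by norm_num),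
          PySem.Int.floordiv_eq_ediv_of_pos (by norm_num)] at hx
      split at hx <;> omega
    obtain ⟨h1, h2⟩ := h0 _ rfl
    rw [h1, h2]
    simp
  · -- pad = l - n > 0
    rw [not_le] at hl
    set k : Nat := (l - n).toNat with hk
    have hlk : l = n + (k : Int) := by omega
    rw [hlk, pvLoop k n s.toList]
    have hpad : max 0 (n + (k : Int) - n) = (k : Int) := by omega
    rw [hpad]
    have hleft : ∀ x : Int, (if PySem.Int.mod n 2 = 0 then PySem.Int.floordiv ((k : Int) + 1) 2
        else PySem.Int.floordiv (k : Int) 2) = x →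
        x.toNat = pvEvens n k ∧ ((k : Int) - x).toNat = k - pvEvens n k := by
      intro x hx
      rw [PySem.Int.floordiv_eq_ediv_of_pos (by norm_num),
          PySem.Int.floordiv_eq_ediv_of_pos (by norm_num)] at hx
      unfold pvEvens
      split at hx <;> rename_i hcase <;> simp only [hcase, if_true, if_false] <;> omega
    obtain ⟨h1, h2⟩ := hleft _ rfl
    rw [h1, h2]
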